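-- pv_equiv track=rewrite | github.com/jtuckerfoltz/LockedPolyominoTilings | locked_polyomino_tilings.py | pf_mult_1
-- ===== SOURCE A (Python) =====
-- def pf_mult_1(side_length, grid, finalized, box=None):
--     best_row = -1
--     best_col = -1
--     best_obj_value = 999999999999
--     for row in range(side_length):
--         for col in range(box if box else (side_length - row)):
--             num_possibilities = len(grid[row][col])
--             if num_possibilities == 0:
--                 return -2, -2
--             elif finalized[row][col]:
--                 continue
--             else:
--                 obj_value = num_possibilities * (row + col + 5)
--                 if obj_value < best_obj_value:
--                     best_row = row
--                     best_col = col
--                     best_obj_value = obj_value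
--     return best_row, best_col
-- ===== SOURCE B (Python) =====
-- def pf_mult_1(side_length, grid, finalized, box=None):
--     cells = [(row, col) for row in range(side_length)
--                         for col in range(box if box else (side_length - row))]
--     if any(len(grid[r][c]) == 0 for r, c in cells):
--         return -2, -2
--     best_row, best_col, best_obj = -1, -1, 999999999999
--     for r, c in cells:
--         if not finalized[r][c]:
--             obj = len(grid[r][c]) * (r + c + 5)
--             if obj < best_obj:
--                 best_row, best_col, best_obj = r, c, obj
--     return best_row, best_col
-- ===== Notes on version B (the rewrite author's own statement) =====
-- stated objective: alternative
-- what changed: A's single fused loop with early exit is decomposed into a flattened row-major region list, a separate validation pass returning (-2,-2) on any empty cell, and a single minimization fold over that list.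
import Mathlib
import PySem

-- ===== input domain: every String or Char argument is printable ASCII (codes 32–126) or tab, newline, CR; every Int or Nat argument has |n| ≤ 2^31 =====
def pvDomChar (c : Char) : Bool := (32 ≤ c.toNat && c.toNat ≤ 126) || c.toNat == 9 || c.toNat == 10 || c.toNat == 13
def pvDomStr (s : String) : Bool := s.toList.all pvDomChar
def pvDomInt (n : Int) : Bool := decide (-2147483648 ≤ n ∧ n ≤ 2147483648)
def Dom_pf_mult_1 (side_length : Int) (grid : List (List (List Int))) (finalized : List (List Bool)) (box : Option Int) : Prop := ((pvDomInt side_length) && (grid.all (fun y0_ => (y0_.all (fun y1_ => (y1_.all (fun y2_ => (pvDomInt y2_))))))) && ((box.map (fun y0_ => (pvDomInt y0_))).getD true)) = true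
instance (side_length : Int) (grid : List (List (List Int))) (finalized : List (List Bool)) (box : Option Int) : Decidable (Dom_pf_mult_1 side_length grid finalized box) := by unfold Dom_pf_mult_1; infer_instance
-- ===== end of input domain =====

-- ===== PORT A =====
-- B differs from A by decomposing A's fused early-exit scan into a flattened region
-- list, a separate validation pass and a single minimization fold (objective: alternative).
-- Helper shared by both ports: the Python column bound `box if box else (side_length - row)`.
def pvColBound (side_length : Int) (box : Option Int) (row : Int) : Int :=
  match box with
  | some b => if b = 0 then side_length - row else b
  | none => side_length - row

-- Port of A: nested loops over rows/cols, early return modelled with Except.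
def pf_mult_1 (side_length : Int) (grid : List (List (List Int))) (finalized : List (List Bool)) (box : Option Int) : Int × Int :=
  let r : Except (Int × Int) (Int × Int × Int) :=
    (PySem.List.pyRange 0 side_length 1).foldl (fun acc row =>
      (PySem.List.pyRange 0 (pvColBound side_length box row) 1).foldl (fun acc2 col =>
        match acc2 with
        | .error e => .error e
        | .ok (br, bc, bo) =>
          let cell := PySem.List.pyGetD (PySem.List.pyGetD grid row []) col []
          let n : Int := cell.length
          if n = 0 then .error (-2, -2)
          else if PySem.List.pyGetD (PySem.List.pyGetD finalized row []) col false then .ok (br, bc, bo)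
          else
            let obj := n * (row + col + 5)
            if obj < bo then .ok (row, col, obj) else .ok (br, bc, bo)) acc)
      (.ok (-1, -1, 999999999999))
  match r with
  | .error e => e
  | .ok (br, bc, _) => (br, bc)

-- ===== PORT B =====
-- B helpers: the flattened scan region and the per-cell accessors.
def pvCells (side_length : Int) (box : Option Int) : List (Int × Int) :=
  (PySem.List.pyRange 0 side_length 1).flatMap (fun row =>
    (PySem.List.pyRange 0 (pvColBound side_length box row) 1).map (fun col => (row, col)))

def pvLen (grid : List (List (List Int))) (r c : Int) : Int :=
  (PySem.List.pyGetD (PySem.List.pyGetD grid r []) c []).length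

def pvFin (finalized : List (List Bool)) (r c : Int) : Bool :=
  PySem.List.pyGetD (PySem.List.pyGetD finalized r []) c false

def pf_mult_1_alt (side_length : Int) (grid : List (List (List Int))) (finalized : List (List Bool)) (box : Option Int) : Int × Int :=
  let cells := pvCells side_length box
  if cells.any (fun p => pvLen grid p.1 p.2 = 0) then (-2, -2)
  else
    let best := cells.foldl (fun (st : Int × Int × Int) p =>
      if pvFin finalized p.1 p.2 then st
      else
        let obj := pvLen grid p.1 p.2 * (p.1 + p.2 + 5)
        if obj < st.2.2 then (p.1, p.2, obj) else st) (-1, -1, 999999999999)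
    (best.1, best.2.1)

-- ===== PRECONDITION & SPEC =====
-- Pre_ helpers. A reads finalized[r][c] only at nonempty cells; all quantifiers below are
-- bounded by the actual sizes of grid/finalized so the condition is checked without scanning
-- the (possibly huge) range of row/column indices.
def pvFinOkB (finalized : List (List Bool)) (r c : Nat) : Bool :=
  decide (r < finalized.length) && decide (c < (finalized.getD r []).length)

-- row r' of the scan region is fully indexable and raises nowhere.
def pvRowClean (side_length : Int) (box : Option Int) (grid : List (List (List Int))) (finalized : List (List Bool)) (r' : Nat) : Bool :=
  let g := grid.getD r' []
  let m := pvColBound side_length box (r' : Int)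
  decide (m ≤ (g.length : Int)) &&
    (List.range m.toNat).all (fun c' => (g.getD c' []).isEmpty || pvFinOkB finalized r' c')

-- some scan position would raise an IndexError (grid too short, a row too short, or a
-- nonempty cell not indexable in finalized).
def pvHasBad (side_length : Int) (grid : List (List (List Int))) (finalized : List (List Bool)) (box : Option Int) : Bool :=
  (decide ((grid.length : Int) < side_length) && decide (0 < pvColBound side_length box (grid.length : Int))) ||
  (List.range (min side_length.toNat grid.length)).any (fun r =>
    let g := grid.getD r []
    let m := pvColBound side_length box (r : Int)
    decide ((g.length : Int) < m) ||
      (List.range (min m.toNat g.length)).any (fun c =>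
        !(g.getD c []).isEmpty && !pvFinOkB finalized r c))

-- some empty cell of the scan region is reached (row-major) before any raising position.
def pvGoodEmpty (side_length : Int) (grid : List (List (List Int))) (finalized : List (List Bool)) (box : Option Int) : Bool :=
  (List.range (min side_length.toNat grid.length)).any (fun r =>
    let g := grid.getD r []
    let m := pvColBound side_length box (r : Int)
    (List.range (min m.toNat g.length)).any (fun c =>
      (g.getD c []).isEmpty &&
      (List.range r).all (pvRowClean side_length box grid finalized) &&
      (List.range c).all (fun c' => (g.getD c' []).isEmpty || pvFinOkB finalized r c')))

-- Pre_ excludes exactly the inputs on which A raises IndexError: some scan position is not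
-- indexable (in grid, or in finalized at a nonempty cell) and no empty cell precedes it in
-- row-major order (an earlier empty cell makes A return (-2, -2) before reaching it).
def Pre_pf_mult_1 (side_length : Int) (grid : List (List (List Int))) (finalized : List (List Bool)) (box : Option Int) : Prop :=
  pvHasBad side_length grid finalized box = true → pvGoodEmpty side_length grid finalized box = true
instance (side_length : Int) (grid : List (List (List Int))) (finalized : List (List Bool)) (box : Option Int) : Decidable (Pre_pf_mult_1 side_length grid finalized box) := by unfold Pre_pf_mult_1; infer_instance

def pvWitness_pf_mult_1 : Int × List (List (List Int)) × List (List Bool) × Option Int :=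
  (2, [[[1], [2, 3]], [[4]]], [[false, true], [false]], none)

def Spec_pf_mult_1 (side_length : Int) (grid : List (List (List Int))) (finalized : List (List Bool)) (box : Option Int) (out : Int × Int) : Prop := out = pf_mult_1_alt side_length grid finalized box
instance (side_length : Int) (grid : List (List (List Int))) (finalized : List (List Bool)) (box : Option Int) (out : Int × Int) : Decidable (Spec_pf_mult_1 side_length grid finalized box out) := by unfold Spec_pf_mult_1; infer_instance

-- ===== CLAIM (what is proved, stated in full; the proofs are below) =====
def Claim_equal_pf_mult_1 : Prop := ∀ (side_length : Int) (grid : List (List (List Int))) (finalized : List (List Bool)) (box : Option Int), Dom_pf_mult_1 side_length grid finalized box → Pre_pf_mult_1 side_length grid finalized box → Spec_pf_mult_1 side_length grid finalized box (pf_mult_1 side_length grid finalized box)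

-- ===== LEMMAS AND PROOFS =====

-- A's Except-fold step, written over a flattened (row, col) pair.
def pvStepA (grid : List (List (List Int))) (finalized : List (List Bool))
    (acc2 : Except (Int × Int) (Int × Int × Int)) (p : Int × Int) : Except (Int × Int) (Int × Int × Int) :=
  match acc2 with
  | .error e => .error e
  | .ok (br, bc, bo) =>
    if pvLen grid p.1 p.2 = 0 then .error (-2, -2)
    else if pvFin finalized p.1 p.2 then .ok (br, bc, bo)
    else
      let obj := pvLen grid p.1 p.2 * (p.1 + p.2 + 5)
      if obj < bo then .ok (p.1, p.2, obj) else .ok (br, bc, bo)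

-- B's minimization step.
def pvStepB (grid : List (List (List Int))) (finalized : List (List Bool))
    (st : Int × Int × Int) (p : Int × Int) : Int × Int × Int :=
  if pvFin finalized p.1 p.2 then st
  else
    let obj := pvLen grid p.1 p.2 * (p.1 + p.2 + 5)
    if obj < st.2.2 then (p.1, p.2, obj) else st

theorem pvStepA_ok (grid : List (List (List Int))) (finalized : List (List Bool)) (st : Int × Int × Int) (p : Int × Int)
    (h : ¬ pvLen grid p.1 p.2 = 0) :
    pvStepA grid finalized (.ok st) p = .ok (pvStepB grid finalized st p) := by
  obtain ⟨a, b, c⟩ := st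
  simp only [pvStepA, pvStepB, h, if_false]
  split_ifs <;> rfl

theorem pvStepA_error (grid : List (List (List Int))) (finalized : List (List Bool)) (e : Int × Int) (L : List (Int × Int)) :
    L.foldl (pvStepA grid finalized) (.error e) = .error e := by
  induction L with
  | nil => rfl
  | cons p L ih => simpa [pvStepA] using ih

-- The fused early-exit fold is validation + minimization.
theorem pvFoldA_eq (grid : List (List (List Int))) (finalized : List (List Bool)) (L : List (Int × Int)) (st : Int × Int × Int) :
    L.foldl (pvStepA grid finalized) (.ok st) =
      if L.any (fun p => pvLen grid p.1 p.2 = 0) then .error ((-2 : Int), (-2 : Int))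
      else .ok (L.foldl (pvStepB grid finalized) st) := by
  induction L generalizing st with
  | nil => simp
  | cons p L ih =>
    by_cases h : pvLen grid p.1 p.2 = 0
    · obtain ⟨a, b, c⟩ := st
      simp [pvStepA, h, pvStepA_error]
    · rw [List.foldl_cons, pvStepA_ok grid finalized st p h, ih]
      rw [List.any_cons, List.foldl_cons, decide_eq_false h, Bool.false_or]

-- A's nested fold equals the flat fold over pvCells.
theorem pvNested_eq_flat (side_length : Int) (grid : List (List (List Int))) (finalized : List (List Bool)) (box : Option Int)
    (init : Except (Int × Int) (Int × Int × Int)) :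
    (PySem.List.pyRange 0 side_length 1).foldl (fun acc row =>
      (PySem.List.pyRange 0 (pvColBound side_length box row) 1).foldl (fun acc2 col =>
        match acc2 with
        | .error e => .error e
        | .ok (br, bc, bo) =>
          let cell := PySem.List.pyGetD (PySem.List.pyGetD grid row []) col []
          let n : Int := cell.length
          if n = 0 then .error (-2, -2)
          else if PySem.List.pyGetD (PySem.List.pyGetD finalized row []) col false then .ok (br, bc, bo)
          else
            let obj := n * (row + col + 5)
            if obj < bo then .ok (row, col, obj) else .ok (br, bc, bo)) acc) init =
    (pvCells side_length box).foldl (pvStepA grid finalized) init := by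
  unfold pvCells
  rw [List.foldl_flatMap]
  congr 1
  funext acc row
  rw [List.foldl_map]
  congr 1

-- ===== VERDICT (by name: the statement is the Claim_ definition above) =====
theorem pf_mult_1_spec : Claim_equal_pf_mult_1 := by
  intro side_length grid finalized box _ _
  unfold Spec_pf_mult_1 pf_mult_1 pf_mult_1_alt
  rw [pvNested_eq_flat, pvFoldA_eq]
  by_cases h : (pvCells side_length box).any (fun p => pvLen grid p.1 p.2 = 0)
  · simp [h]
  · simp only [h, if_neg, Bool.false_eq_true, not_false_eq_true]
    rfl
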